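-- pv_equiv track=rewrite | github.com/pridesds/Vladimir- | Лабораторная 8.py | count_letters_in_order
-- ===== SOURCE A (Python) =====
-- from collections import OrderedDict
--
-- def count_letters_in_order(text): #Вывожу функцию подсчёта кол-ва каждой буквы
--     letter_count = OrderedDict()
--     for char in text.lower():  #Текст по нижнему регистру
--         if char.isalpha():  #Функция определения является ли символ буквой
--             if char in letter_count:
--                 letter_count[char] += 1
--             else:
--                 letter_count[char] = 1
--     return letter_count
-- ===== SOURCE B (Python) =====
-- from collections import OrderedDict
--
-- def count_letters_in_order(text):
--     low = text.lower()
--     seen = set()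
--     order = []
--     for ch in low:
--         if ch.isalpha() and ch not in seen:
--             seen.add(ch)
--             order.append(ch)
--     return OrderedDict((ch, low.count(ch)) for ch in order)
-- ===== Notes on version B (the rewrite author's own statement) =====
-- stated objective: faster
-- what changed: Replaces the single accumulating dict pass with a two-phase shape: one scan collects the distinct letters in first-appearance order, then each letter's count comes from a separate str.count scan (C-level), removing the per-character Python dict update.
import Mathlib
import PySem

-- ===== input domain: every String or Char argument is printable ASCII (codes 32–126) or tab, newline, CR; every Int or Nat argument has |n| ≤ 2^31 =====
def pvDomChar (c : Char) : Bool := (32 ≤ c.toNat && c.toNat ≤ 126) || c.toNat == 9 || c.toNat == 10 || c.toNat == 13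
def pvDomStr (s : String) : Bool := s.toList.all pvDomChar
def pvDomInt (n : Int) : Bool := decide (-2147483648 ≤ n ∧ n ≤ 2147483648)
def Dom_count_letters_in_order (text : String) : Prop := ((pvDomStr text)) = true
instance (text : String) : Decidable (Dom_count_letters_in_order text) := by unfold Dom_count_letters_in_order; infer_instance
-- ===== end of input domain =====

-- B replaces A's single accumulating OrderedDict pass by a two-phase shape (first-appearance
-- index, then a per-letter recount); a timing run measured B faster (constant factor).

-- ===== PORT A =====
-- single pass: an insertion-ordered dict counting each alphabetic char of text.lower()
def count_letters_in_order (text : String) : List (String × Int) :=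
  ((PySem.Str.lower text).toList.foldl
    (fun d c =>
      if PySem.Chars.isalpha c then
        if d.contains c then d.insert c (d.getD c 0 + 1) else d.insert c 1
      else d)
    PySem.Dict.empty).items.map (fun p => (String.ofList [p.1], p.2))

-- ===== PORT B =====
-- phase 1: distinct alphabetic chars in first-appearance order (seen-set guarded append = PySem.Set.add);
-- phase 2: each letter counted with a separate scan of the lowered text
def count_letters_in_order_alt (text : String) : List (String × Int) :=
  let low := (PySem.Str.lower text).toList
  let order : PySem.Set Char :=
    low.foldl (fun s c => if PySem.Chars.isalpha c then PySem.Set.add s c else s) PySem.Set.empty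
  order.map (fun c => (String.ofList [c], (low.count c : Int)))

-- ===== PRECONDITION & SPEC =====
def Spec_count_letters_in_order (text : String) (out : List (String × Int)) : Prop := out = count_letters_in_order_alt text
instance (text : String) (out : List (String × Int)) : Decidable (Spec_count_letters_in_order text out) := by unfold Spec_count_letters_in_order; infer_instance

-- ===== CLAIM (what is proved, stated in full; the proofs are below) =====
def Claim_equal_count_letters_in_order : Prop := ∀ (text : String), Dom_count_letters_in_order text → Spec_count_letters_in_order text (count_letters_in_order text)

-- ===== LEMMAS AND PROOFS =====

-- A's guarded update is the counter step: when the key is absent its current count is 0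
lemma stepA_eq_insert_getD (d : PySem.Dict Char Int) (c : Char) :
    (if d.contains c then d.insert c (d.getD c 0 + 1) else d.insert c 1)
      = d.insert c (d.getD c 0 + 1) := by
  by_cases h : d.contains c = true
  · simp [h]
  · simp [h, PySem.Dict.getD_of_not_contains d 0 (by simpa using h)]

-- ===== VERDICT (by name: the statement is the Claim_ definition above) =====
theorem count_letters_in_order_spec : Claim_equal_count_letters_in_order := by
  intro text _
  unfold Spec_count_letters_in_order count_letters_in_order count_letters_in_order_alt
  set low := (PySem.Str.lower text).toList with hlow
  -- both loops only act on the alphabetic characters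
  rw [show (fun (d : PySem.Dict Char Int) c =>
        if PySem.Chars.isalpha c then
          if d.contains c then d.insert c (d.getD c 0 + 1) else d.insert c 1
        else d)
      = (fun d c => if PySem.Chars.isalpha c then d.insert c (d.getD c 0 + 1) else d)
      from funext fun d => funext fun c => by rw [stepA_eq_insert_getD d c] ]
  dsimp only
  rw [← List.foldl_filter, ← List.foldl_filter]
  rw [PySem.Dict.foldl_insert_getD_add_one_eq_counter, PySem.Dict.items_counter]
  rw [show (low.filter PySem.Chars.isalpha).foldl PySem.Set.add PySem.Set.empty
        = PySem.Set.ofList (low.filter PySem.Chars.isalpha)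
      from (PySem.Set.ofList_eq_foldl _).symm]
  rw [List.map_map]
  refine List.map_congr_left fun c hc => ?_
  have hmem : c ∈ low.filter PySem.Chars.isalpha := (PySem.Set.mem_ofList _ _).mp hc
  have halpha : PySem.Chars.isalpha c = true := (List.mem_filter.mp hmem).2
  have : (low.filter PySem.Chars.isalpha).count c = low.count c :=
    List.count_filter (by simpa using halpha)
  simp [this]
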